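-- pv_equiv track=rewrite | github.com/Adampjones2/WorldeSolver2.0 | testbed.py | word_scorer
-- ===== SOURCE A (Python) =====
-- def word_scorer(word, letter_freqs):
--     letter_frequencies = dict()
--     word_score = 0
--     for letter in word:
--         if letter in letter_frequencies:
--             letter_frequencies[letter] += 1
--         else:
--             word_score += letter_freqs[letter]
--             letter_frequencies[letter] = 1
--     return word_score
-- ===== SOURCE B (Python) =====
-- def word_scorer(word, letter_freqs):
--     # recursive select-and-filter: score the first letter, then recurse on the
--     # word with every occurrence of that letter removed
--     if not word:
--         return 0
--     c = word[0]
--     return letter_freqs[c] + word_scorer(word.replace(c, ''), letter_freqs)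
-- ===== Notes on version B (the rewrite author's own statement) =====
-- stated objective: alternative
-- what changed: Replaces A's single interleaved pass with a seen-counter dict and an in-loop membership branch by a recursive select-and-filter scheme: score the first letter, strip all its occurrences with str.replace, and recurse; no dict, set or seen-tracking is kept at all.
import Mathlib
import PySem

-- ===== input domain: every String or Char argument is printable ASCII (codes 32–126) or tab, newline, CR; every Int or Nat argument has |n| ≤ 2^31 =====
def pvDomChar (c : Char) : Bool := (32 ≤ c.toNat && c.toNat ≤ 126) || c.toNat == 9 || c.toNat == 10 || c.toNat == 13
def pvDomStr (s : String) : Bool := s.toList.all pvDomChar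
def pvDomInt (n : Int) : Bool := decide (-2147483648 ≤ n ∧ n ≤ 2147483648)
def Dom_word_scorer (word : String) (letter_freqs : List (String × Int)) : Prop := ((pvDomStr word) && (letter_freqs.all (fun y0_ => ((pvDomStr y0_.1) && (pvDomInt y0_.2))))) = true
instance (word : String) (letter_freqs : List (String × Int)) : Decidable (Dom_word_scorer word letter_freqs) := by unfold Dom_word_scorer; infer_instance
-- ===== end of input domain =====

-- B replaces A's interleaved seen-dict pass by a recursive select-and-filter scheme (score first
-- letter, strip all its occurrences, recurse); return values proved equal on Pre_ (no KeyError).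

-- ===== PORT A =====
-- loop over the word's letters carrying (letter_frequencies, word_score); the
-- letter_freqs[letter] lookup is total via getD 0 — Pre_ excludes the KeyError (missing-key) case.
def word_scorer_loop (letter_freqs : List (String × Int)) :
    List Char → PySem.Dict Char Int → Int → PySem.Dict Char Int × Int
  | [], lfreq, score => (lfreq, score)
  | c :: rest, lfreq, score =>
    if lfreq.contains c then
      word_scorer_loop letter_freqs rest (lfreq.modify c 0 (· + 1)) score
    else
      word_scorer_loop letter_freqs rest (lfreq.insert c 1)
        (score + (PySem.Dict.mk letter_freqs).getD (String.mk [c]) 0)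

def word_scorer (word : String) (letter_freqs : List (String × Int)) : Int :=
  (word_scorer_loop letter_freqs word.toList PySem.Dict.empty 0).2

-- ===== PORT B =====
-- recursion over the word's characters; word.replace(c, '') with c a single character is exactly
-- List.filter (· ≠ c) on the character list (removes every occurrence, keeps order) — exact here.
-- letter_freqs[c] is total via getD 0; Pre_ excludes the KeyError case, as on A's side.
def word_scorer_alt_rec (letter_freqs : List (String × Int)) : List Char → Int
  | [] => 0
  | c :: rest =>
    (PySem.Dict.mk letter_freqs).getD (String.mk [c]) 0 +
      word_scorer_alt_rec letter_freqs (rest.filter (fun x => decide (x ≠ c)))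
  termination_by cs => cs.length
  decreasing_by
    simp only [List.length_unattach, List.length_cons]
    exact Nat.lt_succ_of_le (le_trans (List.length_filter_le _ _) (by simp))

def word_scorer_alt (word : String) (letter_freqs : List (String × Int)) : Int :=
  word_scorer_alt_rec letter_freqs word.toList

-- ===== PRECONDITION & SPEC =====
-- Pre_ excludes exactly the inputs where Python A (and Python B) raise KeyError:
-- a letter of the word that is not a key of letter_freqs.
def Pre_word_scorer (word : String) (letter_freqs : List (String × Int)) : Prop :=
  (word.toList.all (fun c => (PySem.Dict.mk letter_freqs).contains (String.mk [c]))) = true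
instance (word : String) (letter_freqs : List (String × Int)) : Decidable (Pre_word_scorer word letter_freqs) := by unfold Pre_word_scorer; infer_instance

def pvWitness_word_scorer : String × (List (String × Int)) := ("abca", [("a", 3), ("b", -1), ("c", 0)])

def Spec_word_scorer (word : String) (letter_freqs : List (String × Int)) (out : Int) : Prop := out = word_scorer_alt word letter_freqs
instance (word : String) (letter_freqs : List (String × Int)) (out : Int) : Decidable (Spec_word_scorer word letter_freqs out) := by unfold Spec_word_scorer; infer_instance

-- ===== CLAIM (what is proved, stated in full; the proofs are below) =====
def Claim_equal_word_scorer : Prop := ∀ (word : String) (letter_freqs : List (String × Int)), Dom_word_scorer word letter_freqs → Pre_word_scorer word letter_freqs → Spec_word_scorer word letter_freqs (word_scorer word letter_freqs)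

-- ===== LEMMAS AND PROOFS =====

-- the value either side adds for a fresh letter
def pvG (letter_freqs : List (String × Int)) (c : Char) : Int :=
  (PySem.Dict.mk letter_freqs).getD (String.mk [c]) 0

-- the sum of pvG over the letters of cs not already in s, first occurrences only
def pvNewSum (letter_freqs : List (String × Int)) (s : List Char) : List Char → Int
  | [] => 0
  | c :: rest =>
    if c ∈ s then pvNewSum letter_freqs s rest
    else pvG letter_freqs c + pvNewSum letter_freqs (s ++ [c]) rest

lemma loop_eq_newSum (letter_freqs : List (String × Int)) :
    ∀ (cs : List Char) (d : PySem.Dict Char Int) (score : Int),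
      (word_scorer_loop letter_freqs cs d score).2 =
        score + pvNewSum letter_freqs d.keys cs := by
  intro cs
  induction cs with
  | nil => intro d score; simp [word_scorer_loop, pvNewSum]
  | cons c rest ih =>
    intro d score
    by_cases h : c ∈ d.keys
    · have hc : d.contains c = true := by
        rw [PySem.Dict.contains_eq_decide_mem_keys]; simpa
      have hk : (d.modify c 0 (· + 1)).keys = d.keys := by
        simp [PySem.Dict.keys_modify, PySem.Dict.keys_insert_of_contains, hc]
      simp [word_scorer_loop, hc, pvNewSum, h, ih, hk]
    · have hc : d.contains c = false := by
        rw [PySem.Dict.contains_eq_decide_mem_keys]; simpa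
      have hk : (d.insert c 1).keys = d.keys ++ [c] := by
        rw [PySem.Dict.keys_insert_of_not_contains] <;> simp_all
      simp only [word_scorer_loop, hc, Bool.false_eq_true, if_false, pvNewSum, h, ih, hk]
      unfold pvG
      ring

lemma newSum_eq_update (letter_freqs : List (String × Int)) :
    ∀ (cs s : List Char),
      pvNewSum letter_freqs s cs =
        ((PySem.Set.update s cs).map (pvG letter_freqs)).sum - (s.map (pvG letter_freqs)).sum := by
  intro cs
  induction cs with
  | nil => intro s; simp [pvNewSum, PySem.Set.update]
  | cons c rest ih =>
    intro s
    have hupd : PySem.Set.update s (c :: rest) = PySem.Set.update (PySem.Set.add s c) rest := by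
      simp [PySem.Set.update]
    by_cases h : c ∈ s
    · have hadd : PySem.Set.add s c = s := by
        simp [PySem.Set.add, PySem.Set.contains, h]
      rw [pvNewSum, if_pos h, hupd, hadd, ih]
    · have hadd : PySem.Set.add s c = s ++ [c] := by
        simp [PySem.Set.add, PySem.Set.contains, h]
      rw [pvNewSum, if_neg h, hupd, hadd, ih]
      simp
      ring

-- updating with letters equal to a letter already in s is a no-op
lemma update_filter_mem {c : Char} :
    ∀ (cs s : List Char), c ∈ s →
      PySem.Set.update s cs = PySem.Set.update s (cs.filter (fun x => decide (x ≠ c))) := by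
  intro cs
  induction cs with
  | nil => intro s _; rfl
  | cons a rest ih =>
    intro s hs
    by_cases hac : a = c
    · subst hac
      have hadd : PySem.Set.add s a = s := by
        simp [PySem.Set.add, PySem.Set.contains, hs]
      have hf : (a :: rest).filter (fun x => decide (x ≠ a))
          = rest.filter (fun x => decide (x ≠ a)) := by simp
      simp only [PySem.Set.update, List.foldl_cons] at *
      rw [hf, hadd]
      exact ih s hs
    · have hmem : c ∈ PySem.Set.add s a := by
        simp [PySem.Set.add, PySem.Set.contains]
        split <;> simp [hs]
      have hf : (a :: rest).filter (fun x => decide (x ≠ c))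
          = a :: rest.filter (fun x => decide (x ≠ c)) := by simp [hac]
      simp only [PySem.Set.update, List.foldl_cons] at *
      rw [hf, List.foldl_cons]
      exact ih (PySem.Set.add s a) hmem

-- pushing a fresh head through update: c never occurs in cs, so c stays in front untouched
lemma update_cons_fresh {c : Char} :
    ∀ (cs s : List Char), c ∉ cs →
      PySem.Set.update (c :: s) cs = c :: PySem.Set.update s cs := by
  intro cs
  induction cs with
  | nil => intro s _; rfl
  | cons a rest ih =>
    intro s hc
    have hac : a ≠ c := by rintro rfl; exact hc List.mem_cons_self
    have hadd : PySem.Set.add (c :: s) a = c :: PySem.Set.add s a := by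
      simp [PySem.Set.add, PySem.Set.contains, hac]
      split <;> simp
    simp only [PySem.Set.update, List.foldl_cons] at *
    rw [hadd]
    exact ih (PySem.Set.add s a) (fun h => hc (List.mem_cons_of_mem _ h))

-- B's recursion computes the pvG-sum over the distinct letters (first occurrences)
lemma alt_rec_eq_sum (letter_freqs : List (String × Int)) :
    ∀ (cs : List Char),
      word_scorer_alt_rec letter_freqs cs =
        ((PySem.Set.ofList cs).map (pvG letter_freqs)).sum := by
  intro cs
  induction cs using word_scorer_alt_rec.induct with
  | case1 => simp [word_scorer_alt_rec]
  | case2 c rest ih =>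
    have hatt : (List.filter (fun (x : {x // x ∈ rest}) => decide (x.1 ≠ c)) rest.attach).unattach
        = rest.filter (fun x => decide (x ≠ c)) := by
      rw [List.unattach_filter, List.unattach_attach]
      intro x h; rfl
    rw [hatt] at ih
    rw [word_scorer_alt_rec, ih]
    have h1 : PySem.Set.ofList (c :: rest) = PySem.Set.update [c] rest := by
      simp [PySem.Set.ofList_eq_foldl, PySem.Set.update, PySem.Set.add, PySem.Set.contains]
    have h2 : PySem.Set.update [c] rest
        = PySem.Set.update [c] (rest.filter (fun x => decide (x ≠ c))) :=
      update_filter_mem rest [c] (by simp)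
    have h3 : c ∉ rest.filter (fun x => decide (x ≠ c)) := by
      simp [List.mem_filter]
    have h4 : PySem.Set.update [c] (rest.filter (fun x => decide (x ≠ c)))
        = c :: PySem.Set.update [] (rest.filter (fun x => decide (x ≠ c))) :=
      update_cons_fresh _ [] h3
    rw [h1, h2, h4]
    simp [PySem.Set.ofList_eq_foldl, pvG]
    rfl

-- ===== VERDICT (by name: the statement is the Claim_ definition above) =====
theorem word_scorer_spec : Claim_equal_word_scorer := by
  intro word letter_freqs _ _
  unfold Spec_word_scorer word_scorer word_scorer_alt
  rw [loop_eq_newSum, alt_rec_eq_sum]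
  have hkeys : (PySem.Dict.empty : PySem.Dict Char Int).keys = [] := by
    simp [PySem.Dict.keys_empty]
  rw [hkeys, newSum_eq_update]
  have : PySem.Set.ofList word.toList = PySem.Set.update ([] : List Char) word.toList := by
    rw [PySem.Set.ofList_eq_foldl]; rfl
  rw [this]
  simp
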